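-- pv_equiv track=rewrite | github.com/teenbull/urq2puml | urq_fixer.py | _comment_content
-- ===== SOURCE A (Python) =====
-- def _comment_content(content, should_comment):
--     """Комментирует контент если нужно"""
--     if not should_comment or not content:
--         return content
--
--     lines = content.split('\n')
--     commented_lines = [ ]
--     for line in lines:
--         if line.strip() and not line.strip().startswith(';'):
--             commented_lines.append(f";{line}")
--         else:
--             commented_lines.append(line)
--     return '\n'.join(commented_lines)
-- ===== SOURCE B (Python) =====
-- def _comment_content(content, should_comment):
--     """Комментирует контент если нужно"""
--     if not should_comment or not content:
--         return content
--     out = []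
--     start = True
--     for i, c in enumerate(content):
--         if start and _needs_semicolon(content, i):
--             out.append(';')
--         out.append(c)
--         start = (c == '\n')
--     return ''.join(out)
--
--
-- def _needs_semicolon(s, i):
--     # the line starting at i is non-blank and its first non-space char is not ';'
--     while i < len(s):
--         c = s[i]
--         if c == '\n':
--             return False
--         if not c.isspace():
--             return c != ';'
--         i += 1
--     return False
-- ===== Notes on version B (the rewrite author's own statement) =====
-- stated objective: alternative
-- what changed: Replaces A's split(' ') / per-line list building / ' '.join pipeline by a single left-to-right character pass with a line-start flag that inserts ';' at the start of each non-blank, not-already-commented line, never materialising the list of lines.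
import Mathlib
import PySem

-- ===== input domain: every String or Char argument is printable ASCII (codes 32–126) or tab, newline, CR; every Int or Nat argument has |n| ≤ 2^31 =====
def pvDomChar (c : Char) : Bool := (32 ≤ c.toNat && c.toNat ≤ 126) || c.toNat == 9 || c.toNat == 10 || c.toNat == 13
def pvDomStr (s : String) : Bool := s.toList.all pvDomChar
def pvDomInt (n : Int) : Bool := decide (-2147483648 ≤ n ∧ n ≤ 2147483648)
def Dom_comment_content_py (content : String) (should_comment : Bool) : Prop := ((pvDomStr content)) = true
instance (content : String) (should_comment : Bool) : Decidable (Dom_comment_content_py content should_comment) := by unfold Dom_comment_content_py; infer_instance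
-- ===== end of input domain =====

-- B replaces A's split('\n') / per-line list / '\n'.join pipeline by a single left-to-right pass
-- over the characters with a line-start flag (objective: alternative/simpler traversal, no intermediate list of lines).

-- ===== PORT A =====
-- A's per-line test: line.strip() and not line.strip().startswith(';')
def pvLineCond (line : List Char) : Bool :=
  !(PySem.Chars.strip line).isEmpty && !PySem.Chars.startswith (PySem.Chars.strip line) [';']

def comment_content_py (content : String) (should_comment : Bool) : String :=
  if !should_comment || content == "" then content
  else
    let lines := PySem.Chars.splitOn content.toList ['\n']
    let commented := lines.foldl
      (fun acc line => acc ++ [if pvLineCond line then ';' :: line else line]) []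
    String.mk (PySem.Chars.join ['\n'] commented)

-- ===== PORT B =====
-- B's helper _needs_semicolon(s, i): scan of the suffix that starts at the current line
def pvNeeds : List Char → Bool
  | [] => false
  | c :: t => if c = '\n' then false else if PySem.Chars.isspace c then pvNeeds t else decide (c ≠ ';')

-- B's main loop: one pass with a line-start flag
def pvGo : List Char → Bool → List Char
  | [], _ => []
  | c :: t, start =>
    (if start && pvNeeds (c :: t) then [';'] else []) ++ c :: pvGo t (c == '\n')

def comment_content_py_alt (content : String) (should_comment : Bool) : String :=
  if !should_comment || content == "" then content
  else String.mk (pvGo content.toList true)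

-- ===== PRECONDITION & SPEC =====
def Spec_comment_content_py (content : String) (should_comment : Bool) (out : String) : Prop := out = comment_content_py_alt content should_comment
instance (content : String) (should_comment : Bool) (out : String) : Decidable (Spec_comment_content_py content should_comment out) := by unfold Spec_comment_content_py; infer_instance

-- ===== CLAIM (what is proved, stated in full; the proofs are below) =====
def Claim_equal_comment_content_py : Prop := ∀ (content : String) (should_comment : Bool), Dom_comment_content_py content should_comment → Spec_comment_content_py content should_comment (comment_content_py content should_comment)

-- ===== LEMMAS AND PROOFS =====

-- reference single-char split used to characterise PySem.Chars.splitOn · ['\n']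
def pvConsHd (c : Char) : List (List Char) → List (List Char)
  | [] => [[c]]
  | x :: xs => (c :: x) :: xs

def pvSplit : List Char → List (List Char)
  | [] => [[]]
  | c :: t => if c = '\n' then [] :: pvSplit t else pvConsHd c (pvSplit t)

def pvConsPre (p : List Char) : List (List Char) → List (List Char)
  | [] => [p]
  | x :: xs => (p ++ x) :: xs

lemma pvSplit_ne_nil (l : List Char) : pvSplit l ≠ [] := by
  cases l with
  | nil => simp [pvSplit]
  | cons c t =>
    simp only [pvSplit]
    split
    · simp
    · cases h : pvSplit t <;> simp [pvConsHd]

lemma pvConsPre_nil (l : List Char) : pvConsPre [] (pvSplit l) = pvSplit l := by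
  cases h : pvSplit l with
  | nil => exact absurd h (pvSplit_ne_nil l)
  | cons x xs => simp [pvConsPre]

lemma pv_go_spec : ∀ (fuel : Nat) (l cur : List Char) (acc : List (List Char)), l.length < fuel →
    PySem.Chars.splitOn.go ['\n'] fuel l cur acc = acc.reverse ++ pvConsPre cur.reverse (pvSplit l) := by
  intro fuel
  induction fuel with
  | zero => intro l cur acc h; omega
  | succ n ih =>
    intro l cur acc h
    cases l with
    | nil => simp [PySem.Chars.splitOn.go, pvSplit, pvConsPre]
    | cons c rest =>
      have hlen : rest.length < n := by
        simp at h; omega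
      rw [PySem.Chars.splitOn.go]
      by_cases hc : c = '\n'
      · subst hc
        have hp : List.isPrefixOf ['\n'] ('\n' :: rest) = true := by
          simp [List.isPrefixOf]
        rw [if_pos hp, ih _ _ _ (by simpa using hlen)]
        simp [pvSplit, pvConsPre]
        cases hs : pvSplit rest with
        | nil => exact absurd hs (pvSplit_ne_nil rest)
        | cons x xs => simp
      · have hp : List.isPrefixOf ['\n'] (c :: rest) = false := by
          simp [List.isPrefixOf]
          exact fun hcc => absurd hcc.symm hc
        rw [if_neg (by simp [hp]), ih _ _ _ hlen]
        simp only [pvSplit, if_neg hc]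
        cases hs : pvSplit rest with
        | nil => exact absurd hs (pvSplit_ne_nil rest)
        | cons x xs => simp [pvConsPre, pvConsHd]

lemma pv_splitOn_eq (l : List Char) : PySem.Chars.splitOn l ['\n'] = pvSplit l := by
  unfold PySem.Chars.splitOn
  rw [pv_go_spec (l.length + 1) l [] [] (by omega)]
  simp [pvConsPre_nil]

lemma pvSplit_no_nl (a : List Char) (h : '\n' ∉ a) : pvSplit a = [a] := by
  induction a with
  | nil => simp [pvSplit]
  | cons c t ih =>
    have hc : c ≠ '\n' := fun hc => h (hc ▸ List.mem_cons_self)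
    have ht : '\n' ∉ t := fun hm => h (List.mem_cons_of_mem _ hm)
    simp [pvSplit, hc, ih ht, pvConsHd]

lemma pvSplit_append (a r : List Char) (h : '\n' ∉ a) :
    pvSplit (a ++ '\n' :: r) = a :: pvSplit r := by
  induction a with
  | nil => simp [pvSplit]
  | cons c t ih =>
    have hc : c ≠ '\n' := fun hc => h (hc ▸ List.mem_cons_self)
    have ht : '\n' ∉ t := fun hm => h (List.mem_cons_of_mem _ hm)
    simp [pvSplit, hc, ih ht, pvConsHd]

lemma pvNeeds_append (a r : List Char) (h : '\n' ∉ a) :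
    pvNeeds (a ++ '\n' :: r) = pvNeeds a := by
  induction a with
  | nil => simp [pvNeeds]
  | cons c t ih =>
    have hc : c ≠ '\n' := fun hc => h (hc ▸ List.mem_cons_self)
    have ht : '\n' ∉ t := fun hm => h (List.mem_cons_of_mem _ hm)
    simp [pvNeeds, hc, ih ht]

lemma pv_rstrip_cons (c : Char) (t : List Char) (h : PySem.Chars.isspace c = false) :
    ∃ u, PySem.Chars.rstrip (c :: t) = c :: u := by
  unfold PySem.Chars.rstrip
  rw [show (c :: t).reverse = t.reverse ++ [c] by simp, List.dropWhile_append]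
  split
  · exact ⟨[], by simp [List.dropWhile, h]⟩
  · exact ⟨(List.dropWhile PySem.Chars.isspace t.reverse).reverse, by simp⟩

lemma pvNeeds_eq_cond (a : List Char) (h : '\n' ∉ a) : pvNeeds a = pvLineCond a := by
  induction a with
  | nil => simp [pvNeeds, pvLineCond, PySem.Chars.strip, PySem.Chars.lstrip, PySem.Chars.rstrip]
  | cons c t ih =>
    have hc : c ≠ '\n' := fun hc => h (hc ▸ List.mem_cons_self)
    have ht : '\n' ∉ t := fun hm => h (List.mem_cons_of_mem _ hm)
    by_cases hw : PySem.Chars.isspace c = true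
    · have hl : PySem.Chars.strip (c :: t) = PySem.Chars.strip t := by
        simp [PySem.Chars.strip, PySem.Chars.lstrip, List.dropWhile, hw]
      simp [pvNeeds, hc, hw, ih ht, pvLineCond, hl]
    · have hw' : PySem.Chars.isspace c = false := by simpa using hw
      obtain ⟨u, hu⟩ := pv_rstrip_cons c t hw'
      have hl : PySem.Chars.strip (c :: t) = c :: u := by
        simp [PySem.Chars.strip, PySem.Chars.lstrip, List.dropWhile, hw', hu]
      simp [pvNeeds, hc, hw', pvLineCond, hl, PySem.Chars.startswith, List.isPrefixOf]
      by_cases hcs : c = ';' <;> simp [hcs]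
      · intro hcc; exact absurd hcc.symm hcs

lemma pvGo_end (t : List Char) (h : '\n' ∉ t) : pvGo t false = t := by
  induction t with
  | nil => simp [pvGo]
  | cons c t ih =>
    have hc : c ≠ '\n' := fun hc => h (hc ▸ List.mem_cons_self)
    have ht : '\n' ∉ t := fun hm => h (List.mem_cons_of_mem _ hm)
    have hb : (c == '\n') = false := by simp [hc]
    simp [pvGo, hb, ih ht]

lemma pvGo_copy (t r : List Char) (h : '\n' ∉ t) :
    pvGo (t ++ '\n' :: r) false = t ++ '\n' :: pvGo r true := by
  induction t with
  | nil => simp [pvGo, pvNeeds]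
  | cons c t ih =>
    have hc : c ≠ '\n' := fun hc => h (hc ▸ List.mem_cons_self)
    have ht : '\n' ∉ t := fun hm => h (List.mem_cons_of_mem _ hm)
    have hb : (c == '\n') = false := by simp [hc]
    simp [pvGo, hb, ih ht]

lemma pvGo_line (l : List Char) (h : '\n' ∉ l) :
    pvGo l true = if pvLineCond l then ';' :: l else l := by
  cases l with
  | nil => simp [pvGo, pvLineCond, PySem.Chars.strip, PySem.Chars.lstrip, PySem.Chars.rstrip]
  | cons c t =>
    have hc : c ≠ '\n' := fun hc => h (hc ▸ List.mem_cons_self)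
    have ht : '\n' ∉ t := fun hm => h (List.mem_cons_of_mem _ hm)
    rw [show pvGo (c :: t) true
        = (if true && pvNeeds (c :: t) then [';'] else []) ++ c :: pvGo t (c == '\n') from rfl]
    rw [pvNeeds_eq_cond _ h]
    have hb : (c == '\n') = false := by simp [hc]
    simp [hb, pvGo_end t ht]
    by_cases hcond : pvLineCond (c :: t) <;> simp [hcond]

lemma pvGo_line_append (a r : List Char) (h : '\n' ∉ a) :
    pvGo (a ++ '\n' :: r) true
      = (if pvLineCond a then ';' :: a else a) ++ '\n' :: pvGo r true := by
  cases a with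
  | nil =>
    simp [pvGo, pvNeeds, pvLineCond, PySem.Chars.strip, PySem.Chars.lstrip, PySem.Chars.rstrip]
  | cons c t =>
    have hc : c ≠ '\n' := fun hc => h (hc ▸ List.mem_cons_self)
    have ht : '\n' ∉ t := fun hm => h (List.mem_cons_of_mem _ hm)
    rw [show pvGo ((c :: t) ++ '\n' :: r) true
        = (if true && pvNeeds (c :: t ++ '\n' :: r) then [';'] else [])
            ++ c :: pvGo (t ++ '\n' :: r) (c == '\n') from rfl]
    rw [pvNeeds_append _ _ h, pvNeeds_eq_cond _ h]
    have hb : (c == '\n') = false := by simp [hc]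
    simp [hb, pvGo_copy t r ht]
    by_cases hcond : pvLineCond (c :: t) <;> simp [hcond]

lemma pv_decomp (l : List Char) (h : '\n' ∈ l) :
    ∃ a r, '\n' ∉ a ∧ l = a ++ '\n' :: r := by
  induction l with
  | nil => simp at h
  | cons c t ih =>
    by_cases hc : c = '\n'
    · exact ⟨[], t, by simp, by simp [hc]⟩
    · have hm : '\n' ∈ t := by
        rcases List.mem_cons.mp h with h1 | h2
        · exact absurd h1.symm hc
        · exact h2
      obtain ⟨a, r, hna, he⟩ := ih hm
      exact ⟨c :: a, r, by
        intro hmem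
        rcases List.mem_cons.mp hmem with h1 | h2
        · exact hc h1.symm
        · exact hna h2, by simp [he]⟩

lemma pv_core (l : List Char) :
    PySem.Chars.join ['\n']
      ((pvSplit l).map (fun line => if pvLineCond line then ';' :: line else line))
      = pvGo l true := by
  suffices hs : ∀ n (l : List Char), l.length ≤ n →
      PySem.Chars.join ['\n']
        ((pvSplit l).map (fun line => if pvLineCond line then ';' :: line else line))
        = pvGo l true from hs l.length l le_rfl
  intro n
  induction n with
  | zero =>
    intro l hl
    have : l = [] := List.length_eq_zero_iff.mp (Nat.le_zero.mp hl)
    subst this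
    have hc0 : pvLineCond [] = false := by decide
    simp [pvSplit, pvGo, hc0, PySem.Chars.join_singleton]
  | succ n ih =>
    intro l hl
    by_cases hm : '\n' ∈ l
    · obtain ⟨a, r, hna, he⟩ := pv_decomp l hm
      subst he
      have hr : r.length ≤ n := by
        have := hl; simp [List.length_append] at this; omega
      rw [pvSplit_append _ _ hna, pvGo_line_append _ _ hna, ← ih r hr]
      cases hsp : (pvSplit r).map (fun line => if pvLineCond line then ';' :: line else line) with
      | nil =>
        have := pvSplit_ne_nil r
        simp [List.map_eq_nil_iff] at hsp
        exact absurd hsp this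
      | cons x xs =>
        rw [List.map_cons, hsp, PySem.Chars.join_cons_cons]
        simp
    · rw [pvSplit_no_nl _ hm, pvGo_line _ hm]
      simp [PySem.Chars.join_singleton]

-- ===== VERDICT (by name: the statement is the Claim_ definition above) =====
theorem comment_content_py_spec : Claim_equal_comment_content_py := by
  intro content sc _
  unfold Spec_comment_content_py comment_content_py comment_content_py_alt
  by_cases hg : (!sc || content == "") = true
  · simp [hg]
  · simp only [hg, Bool.false_eq_true, if_false]
    rw [PySem.List.foldl_append_singleton_eq_map, pv_splitOn_eq, List.nil_append, pv_core]
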